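-- pv_equiv track=rewrite | github.com/BadrSouani/HInter | src/mutation.py | is_Different
-- ===== SOURCE A (Python) =====
-- def is_Different(array1, array2, more_label, less_label):
--     base = set(array1)
--     prediction = set(array2)
--     if not base == prediction:
--         difference = base.symmetric_difference(prediction)
--         for labels in difference:
--             if labels in prediction:
--                 more_label[labels] += 1
--             else:
--                 less_label[labels] += 1
--         return True
--     return False
-- ===== SOURCE B (Python) =====
-- def is_Different(array1, array2, more_label, less_label):
--     xs = sorted(set(array1))
--     ys = sorted(set(array2))
--     diff = False
--     i = j = 0
--     while i < len(xs) and j < len(ys):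
--         if xs[i] == ys[j]:
--             i += 1
--             j += 1
--         elif xs[i] < ys[j]:
--             less_label[xs[i]] += 1
--             i += 1
--             diff = True
--         else:
--             more_label[ys[j]] += 1
--             j += 1
--             diff = True
--     while i < len(xs):
--         less_label[xs[i]] += 1
--         i += 1
--         diff = True
--     while j < len(ys):
--         more_label[ys[j]] += 1
--         j += 1
--         diff = True
--     return diff
-- ===== Notes on version B (the rewrite author's own statement) =====
-- stated objective: alternative
-- what changed: Sorts the two deduplicated label lists and walks them with a two-pointer merge, incrementing less_label/more_label at each mismatch, instead of A's set equality test followed by a symmetric_difference walk with a per-element membership branch.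
-- outside the precondition, e.g. on is_Different(['a'], [], {}, {}): A raises KeyError, B raises KeyError
import Mathlib
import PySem

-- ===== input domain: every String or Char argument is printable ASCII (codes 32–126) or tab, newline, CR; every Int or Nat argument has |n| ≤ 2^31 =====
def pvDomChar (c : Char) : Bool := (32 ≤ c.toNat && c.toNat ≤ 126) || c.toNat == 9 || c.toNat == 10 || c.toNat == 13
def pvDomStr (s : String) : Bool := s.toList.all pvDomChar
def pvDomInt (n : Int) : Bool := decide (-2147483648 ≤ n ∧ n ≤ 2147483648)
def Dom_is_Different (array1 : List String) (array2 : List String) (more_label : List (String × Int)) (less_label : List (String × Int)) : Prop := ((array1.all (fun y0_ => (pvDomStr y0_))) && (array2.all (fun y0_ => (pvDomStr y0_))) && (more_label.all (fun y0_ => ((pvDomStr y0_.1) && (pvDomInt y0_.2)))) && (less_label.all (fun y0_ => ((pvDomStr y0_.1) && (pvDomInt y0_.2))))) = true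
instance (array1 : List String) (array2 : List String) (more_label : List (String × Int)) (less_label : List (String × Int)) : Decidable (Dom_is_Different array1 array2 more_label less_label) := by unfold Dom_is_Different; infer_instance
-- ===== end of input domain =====

-- B replaces A's set-equality test + symmetric_difference walk by sorting the two deduplicated
-- label lists and running a two-pointer merge that increments the counters at each mismatch
-- (objective: alternative). Both A and B mutate more_label/less_label in place identically;
-- the equivalence proved here is about the RETURN value.
-- ===== PORT A =====
def is_Different (array1 : List String) (array2 : List String) (more_label : List (String × Int)) (less_label : List (String × Int)) : Bool :=
  let base := PySem.Set.ofList array1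
  let prediction := PySem.Set.ofList array2
  if !(PySem.Set.equal base prediction) then
    let difference := PySem.Set.symmDiff base prediction
    -- the loop mutates the two counter dicts (keys already present under Pre_); the dict state
    -- does not reach the Bool result, so the fold's value is bound and discarded
    let _ := difference.foldl
      (fun (st : PySem.Dict String Int × PySem.Dict String Int) labels =>
        if PySem.Set.contains prediction labels then (st.1.modify labels 0 (· + 1), st.2)
        else (st.1, st.2.modify labels 0 (· + 1)))
      (PySem.Dict.mk more_label, PySem.Dict.mk less_label)
    true
  else false

-- ===== PORT B =====
-- the two-pointer 'while i < len(xs) and j < len(ys)' loop, as structural recursion on the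
-- unconsumed suffixes xs[i:], ys[j:]; state = (more_label, less_label, diff); the two trailing
-- while-loops drain the leftover suffixes into the counters and set diff per iteration
def pvMerge : List String → List String → PySem.Dict String Int → PySem.Dict String Int → Bool →
    PySem.Dict String Int × PySem.Dict String Int × Bool
  | x :: xs, y :: ys, more, less, diff =>
    if x == y then pvMerge xs ys more less diff
    else if x < y then pvMerge xs (y :: ys) more (less.modify x 0 (· + 1)) true
    else pvMerge (x :: xs) ys (more.modify y 0 (· + 1)) less true
  | xs, ys, more, less, diff =>
    let (less, diff) := xs.foldl (fun st x => (st.1.modify x 0 (· + 1), true)) (less, diff)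
    let (more, diff) := ys.foldl (fun st y => (st.1.modify y 0 (· + 1), true)) (more, diff)
    (more, less, diff)

def is_Different_alt (array1 : List String) (array2 : List String) (more_label : List (String × Int)) (less_label : List (String × Int)) : Bool :=
  let xs := PySem.List.sorted (PySem.Set.ofList array1) (fun x => x) false
  let ys := PySem.List.sorted (PySem.Set.ofList array2) (fun x => x) false
  (pvMerge xs ys (PySem.Dict.mk more_label) (PySem.Dict.mk less_label) false).2.2

-- ===== PRECONDITION & SPEC =====
-- Pre_ excludes exactly the inputs on which Python A raises KeyError: some label of one array but
-- not the other is missing from the counter dict it would be incremented in (B raises there too).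
def Pre_is_Different (array1 : List String) (array2 : List String) (more_label : List (String × Int)) (less_label : List (String × Int)) : Prop :=
  (∀ x ∈ array2, x ∉ array1 → x ∈ more_label.map Prod.fst) ∧
  (∀ x ∈ array1, x ∉ array2 → x ∈ less_label.map Prod.fst)
instance (array1 : List String) (array2 : List String) (more_label : List (String × Int)) (less_label : List (String × Int)) : Decidable (Pre_is_Different array1 array2 more_label less_label) := by unfold Pre_is_Different; infer_instance
def pvWitness_is_Different : List String × List String × (List (String × Int)) × (List (String × Int)) :=
  (["a", "b"], ["b", "c"], [("c", 0)], [("a", 2)])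

def Spec_is_Different (array1 : List String) (array2 : List String) (more_label : List (String × Int)) (less_label : List (String × Int)) (out : Bool) : Prop := out = is_Different_alt array1 array2 more_label less_label
instance (array1 : List String) (array2 : List String) (more_label : List (String × Int)) (less_label : List (String × Int)) (out : Bool) : Decidable (Spec_is_Different array1 array2 more_label less_label out) := by unfold Spec_is_Different; infer_instance

-- ===== CLAIM (what is proved, stated in full; the proofs are below) =====
def Claim_equal_is_Different : Prop := ∀ (array1 : List String) (array2 : List String) (more_label : List (String × Int)) (less_label : List (String × Int)), Dom_is_Different array1 array2 more_label less_label → Pre_is_Different array1 array2 more_label less_label → Spec_is_Different array1 array2 more_label less_label (is_Different array1 array2 more_label less_label)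

-- ===== LEMMAS AND PROOFS =====

-- the drain loop's flag: true as soon as the loop runs at least once
theorem pvDrain_bool (l : List String) (d : PySem.Dict String Int) (b : Bool) :
    (l.foldl (fun st x => (st.1.modify x 0 (· + 1), true)) (d, b)).2 = (b || !l.isEmpty) := by
  induction l generalizing d b with
  | nil => simp
  | cons x t ih => simp [ih]

-- the merge's Bool component is exactly "diff was already set, or the two lists are unequal"
theorem pvMerge_bool (xs ys : List String) (more less : PySem.Dict String Int) (diff : Bool) :
    (pvMerge xs ys more less diff).2.2 = (diff || decide (xs ≠ ys)) := by
  fun_induction pvMerge xs ys more less diff with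
  | case1 x xs y ys more less diff hxy ih =>
    simp only [ih]
    have hx : x = y := by simpa using hxy
    subst hx; simp
  | case2 x xs y ys more less diff hxy _ ih =>
    simp only [ih]
    have : x ≠ y := by simpa using hxy
    simp [this]
  | case3 x xs y ys more less diff hxy _ ih =>
    simp only [ih]
    have : x ≠ y := by simpa using hxy
    simp [this]
  | case4 xs ys more less diff h =>
    -- one of the suffixes is empty: the drain loops set diff iff a suffix is nonempty
    rcases xs with _ | ⟨x, xs⟩ <;> rcases ys with _ | ⟨y, ys⟩
    · simp
    · simp [pvDrain_bool]
    · simp [pvDrain_bool]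
    · exact (h x xs y ys rfl rfl).elim

-- ===== VERDICT (by name: the statement is the Claim_ definition above) =====
theorem is_Different_spec : Claim_equal_is_Different := by
  intro array1 array2 more_label less_label _ _
  unfold Spec_is_Different is_Different is_Different_alt
  simp only [pvMerge_bool, Bool.false_or]
  have hs : (PySem.List.sorted (PySem.Set.ofList array1) (fun x => x) false =
        PySem.List.sorted (PySem.Set.ofList array2) (fun x => x) false) ↔
      (∀ x, x ∈ array1 ↔ x ∈ array2) := by
    rw [PySem.List.sorted_id_eq_sorted_id_iff_perm,
        List.perm_ext_iff_of_nodup (PySem.Set.nodup_ofList array1) (PySem.Set.nodup_ofList array2)]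
    simp [PySem.Set.mem_ofList]
  have he : PySem.Set.equal (PySem.Set.ofList array1) (PySem.Set.ofList array2) = true ↔
      (∀ x, x ∈ array1 ↔ x ∈ array2) := by
    rw [PySem.Set.equal_iff]
    simp [PySem.Set.mem_ofList]
  cases hcase : PySem.Set.equal (PySem.Set.ofList array1) (PySem.Set.ofList array2) with
  | true => simp [hs.mpr (he.mp hcase)]
  | false =>
    have hne : PySem.List.sorted (PySem.Set.ofList array1) (fun x => x) false ≠
        PySem.List.sorted (PySem.Set.ofList array2) (fun x => x) false := by
      intro hq
      rw [he.mpr (hs.mp hq)] at hcase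
      exact absurd hcase (by simp)
    simp [hne]
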